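-- pv_equiv track=rewrite | github.com/ReismanLab/regio_dataset_design | active_learning/regression/baseline_comparisons.py | get_stable_index
-- ===== SOURCE A (Python) =====
-- def get_stable_index(run, max_, duration, threshold):
--     count = 0
--     for i, p in enumerate(run):
--         if p >= threshold:
--             count += 1
--             if count == duration: # duration is the stability period demanded
--                 return i
--         else:
--             count = 0
--     return max_
-- ===== SOURCE B (Python) =====
-- from itertools import groupby
--
-- def get_stable_index(run, max_, duration, threshold):
--     if duration < 1:
--         return max_
--     start = 0
--     for ok, grp in groupby(run, key=lambda p: p >= threshold):
--         n = sum(1 for _ in grp)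
--         if ok and n >= duration:
--             return start + duration - 1
--         start += n
--     return max_
-- ===== Notes on version B (the rewrite author's own statement) =====
-- stated objective: alternative
-- what changed: Replaced the counter-with-reset element-by-element scan with an itertools.groupby traversal over maximal runs: the first True-run of length >= duration yields start + duration - 1, with duration < 1 answered up front.
import Mathlib
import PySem

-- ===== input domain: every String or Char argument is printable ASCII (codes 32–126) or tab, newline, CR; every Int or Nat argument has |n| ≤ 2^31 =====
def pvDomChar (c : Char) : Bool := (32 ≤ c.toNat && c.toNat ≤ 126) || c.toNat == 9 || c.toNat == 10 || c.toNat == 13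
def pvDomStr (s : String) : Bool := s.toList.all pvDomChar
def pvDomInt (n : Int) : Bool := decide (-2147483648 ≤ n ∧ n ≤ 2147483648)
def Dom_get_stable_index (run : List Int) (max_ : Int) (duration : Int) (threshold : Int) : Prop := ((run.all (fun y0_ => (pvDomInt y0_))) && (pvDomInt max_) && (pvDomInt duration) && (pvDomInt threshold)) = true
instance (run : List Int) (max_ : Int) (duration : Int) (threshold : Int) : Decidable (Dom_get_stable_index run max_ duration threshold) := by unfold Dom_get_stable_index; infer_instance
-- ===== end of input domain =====

-- B replaces A's counter-with-reset scan by a traversal over maximal runs (groupby); same O(n) cost, different decomposition.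

-- ===== PORT A =====
-- A's for-loop over enumerate(run) with the running `count`, early return on count == duration.
def pvLoopA (max_ duration threshold : Int) : List Int → Int → Int → Int
  | [], _, _ => max_
  | p :: rest, i, count =>
    if threshold ≤ p then
      if count + 1 = duration then i
      else pvLoopA max_ duration threshold rest (i + 1) (count + 1)
    else pvLoopA max_ duration threshold rest (i + 1) 0

def get_stable_index (run : List Int) (max_ : Int) (duration : Int) (threshold : Int) : Int :=
  pvLoopA max_ duration threshold run 0 0

-- ===== PORT B =====
-- B's groupby loop: each step consumes one maximal group (takeWhile/dropWhile on the key p >= threshold),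
-- `start` is the running start index of the current group.
def pvLoopB (max_ duration threshold : Int) : List Int → Int → Int
  | [], _ => max_
  | p :: rest, start =>
    if threshold ≤ p then
      let n := (List.takeWhile (fun x => decide (threshold ≤ x)) (p :: rest)).length
      if duration ≤ (n : Int) then start + duration - 1
      else pvLoopB max_ duration threshold (List.dropWhile (fun x => decide (threshold ≤ x)) (p :: rest)) (start + n)
    else
      let n := (List.takeWhile (fun x => !decide (threshold ≤ x)) (p :: rest)).length
      pvLoopB max_ duration threshold (List.dropWhile (fun x => !decide (threshold ≤ x)) (p :: rest)) (start + n)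
termination_by l _ => l.length
decreasing_by
  · rename_i hp _
    simp only [List.dropWhile_cons, hp, decide_true, if_true, List.length_cons]
    exact Nat.lt_succ_of_le (List.length_dropWhile_le _ _)
  · rename_i h
    simp only [List.dropWhile_cons, h, decide_false, Bool.not_false, if_true, List.length_cons]
    exact Nat.lt_succ_of_le (List.length_dropWhile_le _ _)

def get_stable_index_alt (run : List Int) (max_ : Int) (duration : Int) (threshold : Int) : Int :=
  if duration < 1 then max_ else pvLoopB max_ duration threshold run 0

-- ===== PRECONDITION & SPEC =====
def Spec_get_stable_index (run : List Int) (max_ : Int) (duration : Int) (threshold : Int) (out : Int) : Prop := out = get_stable_index_alt run max_ duration threshold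
instance (run : List Int) (max_ : Int) (duration : Int) (threshold : Int) (out : Int) : Decidable (Spec_get_stable_index run max_ duration threshold out) := by unfold Spec_get_stable_index; infer_instance

-- ===== CLAIM (what is proved, stated in full; the proofs are below) =====
def Claim_equal_get_stable_index : Prop := ∀ (run : List Int) (max_ : Int) (duration : Int) (threshold : Int), Dom_get_stable_index run max_ duration threshold → Spec_get_stable_index run max_ duration threshold (get_stable_index run max_ duration threshold)

-- ===== LEMMAS AND PROOFS =====

-- duration < 1: A's count stays ≥ 0, so count+1 ≥ 1 never equals duration; A never returns inside the loop.
theorem pvLoopA_nonpos (max_ duration threshold : Int) (hd : duration < 1) :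
    ∀ (l : List Int) (i c : Int), 0 ≤ c → pvLoopA max_ duration threshold l i c = max_ := by
  intro l
  induction l with
  | nil => intro i c _; rfl
  | cons p rest ih =>
    intro i c hc
    simp only [pvLoopA]
    split
    · have : ¬ (c + 1 = duration) := by omega
      simp only [this, if_false]
      exact ih (i + 1) (c + 1) (by omega)
    · exact ih (i + 1) 0 (by omega)

-- A inside a True-run: with count c accumulated (0 ≤ c < duration), if the leading run completes the
-- period A returns i + (duration - c) - 1, else A proceeds past the run with count irrelevant (reset on
-- the next False element or the list ends).
theorem pvLoopA_run (max_ duration threshold : Int) :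
    ∀ (l : List Int) (i c : Int), 0 ≤ c → c < duration →
      pvLoopA max_ duration threshold l i c =
        if duration ≤ c + ((List.takeWhile (fun x => decide (threshold ≤ x)) l).length : Int) then
          i + (duration - c) - 1
        else
          pvLoopA max_ duration threshold (List.dropWhile (fun x => decide (threshold ≤ x)) l)
            (i + ((List.takeWhile (fun x => decide (threshold ≤ x)) l).length : Int)) 0 := by
  intro l
  induction l with
  | nil =>
    intro i c hc0 hcd
    simp only [List.takeWhile_nil, List.dropWhile_nil, List.length_nil, Int.natCast_zero, add_zero]
    rw [if_neg (by omega : ¬ duration ≤ c)]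
    rfl
  | cons p rest ih =>
    intro i c hc0 hcd
    by_cases hp : threshold ≤ p
    · simp only [pvLoopA, List.takeWhile_cons, List.dropWhile_cons, hp, decide_true, if_true,
        List.length_cons]
      by_cases heq : c + 1 = duration
      · have hcond : duration ≤ c + (((List.takeWhile (fun x => decide (threshold ≤ x)) rest).length + 1 : ℕ) : Int) := by
          push_cast; omega
        simp only [heq, if_true, hcond]
        omega
      · simp only [heq, if_false]
        rw [ih (i + 1) (c + 1) (by omega) (by omega)]
        have hiff : (duration ≤ c + 1 + ((List.takeWhile (fun x => decide (threshold ≤ x)) rest).length : Int)) ↔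
            (duration ≤ c + (((List.takeWhile (fun x => decide (threshold ≤ x)) rest).length + 1 : ℕ) : Int)) := by
          push_cast; omega
        by_cases hcond : duration ≤ c + 1 + ((List.takeWhile (fun x => decide (threshold ≤ x)) rest).length : Int)
        · simp only [hcond, if_true, hiff.mp hcond, if_true]; omega
        · have h2 : ¬ (duration ≤ c + (((List.takeWhile (fun x => decide (threshold ≤ x)) rest).length + 1 : ℕ) : Int)) := by
            intro h; exact hcond (hiff.mpr h)
          simp only [hcond, if_false, h2, if_false]
          congr 1
          push_cast; omega
    · simp only [List.takeWhile_cons, List.dropWhile_cons, hp, decide_false,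
        Bool.false_eq_true, if_false, List.length_nil, Int.natCast_zero, add_zero]
      rw [if_neg (by omega : ¬ duration ≤ c)]
      simp [pvLoopA, hp]

-- A skipping a False-run one element at a time equals skipping it wholesale (count is 0 throughout).
theorem pvLoopA_false_skip (max_ duration threshold : Int) :
    ∀ (l : List Int) (i : Int),
      pvLoopA max_ duration threshold l i 0 =
        pvLoopA max_ duration threshold (List.dropWhile (fun x => !decide (threshold ≤ x)) l)
          (i + ((List.takeWhile (fun x => !decide (threshold ≤ x)) l).length : Int)) 0 := by
  intro l
  induction l with
  | nil => intro i; simp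
  | cons p rest ih =>
    intro i
    by_cases hp : threshold ≤ p
    · simp [hp]
    · simp only [List.takeWhile_cons, List.dropWhile_cons, hp, decide_false, Bool.not_false,
        if_true, List.length_cons]
      have : pvLoopA max_ duration threshold (p :: rest) i 0 = pvLoopA max_ duration threshold rest (i + 1) 0 := by
        simp [pvLoopA, hp]
      rw [this, ih (i + 1)]
      congr 1
      push_cast; omega

-- Main bridge (duration ≥ 1): A's loop starting a group with count 0 equals B's group loop.
theorem pvLoopA_eq_pvLoopB (max_ duration threshold : Int) (hd : 1 ≤ duration) :
    ∀ (n : ℕ) (l : List Int), l.length = n → ∀ (i : Int),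
      pvLoopA max_ duration threshold l i 0 = pvLoopB max_ duration threshold l i := by
  intro n
  induction n using Nat.strong_induction_on with
  | _ n ih =>
    intro l hlen i
    cases l with
    | nil => simp [pvLoopA, pvLoopB]
    | cons p rest =>
      by_cases hp : threshold ≤ p
      · rw [pvLoopA_run max_ duration threshold (p :: rest) i 0 le_rfl (by omega)]
        simp only [pvLoopB, hp, if_true]
        by_cases hcond : duration ≤ ((List.takeWhile (fun x => decide (threshold ≤ x)) (p :: rest)).length : Int)
        · have h0 : duration ≤ 0 + ((List.takeWhile (fun x => decide (threshold ≤ x)) (p :: rest)).length : Int) := by omega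
          simp only [h0, if_true, hcond, if_true]
          omega
        · have h0 : ¬ (duration ≤ 0 + ((List.takeWhile (fun x => decide (threshold ≤ x)) (p :: rest)).length : Int)) := by omega
          simp only [h0, if_false, hcond, if_false]
          have hlt : (List.dropWhile (fun x => decide (threshold ≤ x)) (p :: rest)).length < n := by
            rw [← hlen]
            simp only [List.dropWhile_cons, hp, decide_true, if_true]
            exact Nat.lt_succ_of_le (List.length_dropWhile_le _ _)
          rw [ih _ hlt _ rfl]
      · rw [pvLoopA_false_skip]
        simp only [pvLoopB, hp, if_false]
        have hlt : (List.dropWhile (fun x => !decide (threshold ≤ x)) (p :: rest)).length < n := by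
          rw [← hlen]
          simp only [List.dropWhile_cons, hp, decide_false, Bool.not_false, if_true]
          exact Nat.lt_succ_of_le (List.length_dropWhile_le _ _)
        rw [ih _ hlt _ rfl]

-- ===== VERDICT (by name: the statement is the Claim_ definition above) =====
theorem get_stable_index_spec : Claim_equal_get_stable_index := by
  intro run max_ duration threshold _
  unfold Spec_get_stable_index get_stable_index get_stable_index_alt
  by_cases hd : duration < 1
  · simp only [hd, if_true]
    exact pvLoopA_nonpos max_ duration threshold hd run 0 0 le_rfl
  · simp only [hd, if_false]
    exact pvLoopA_eq_pvLoopB max_ duration threshold (by omega) run.length run rfl 0
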